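-- pv_equiv track=rewrite | github.com/proganalysis/python3_types | Result/4079files/source_2/3586.py | twinArrays
-- ===== SOURCE A (Python) =====
-- def getKey(x):
--     return x[0]
--
-- def twinArrays(ar1, ar2):
--     # Complete this function
--     ar3=[[0 for i in range(2)] for j in range(len(ar1))]
--     ar4=[[0 for i in range(2)] for j in range(len(ar2))]
--     for i in range(len(ar1)):
--         ar3[i][0]=ar1[i]
--         ar3[i][1]=i
--         ar4[i][0]=ar2[i]
--         ar4[i][1]=i
--     ar3.sort(key = getKey)
--     ar4.sort(key = getKey)
--     i=0
--     if (ar3[i][1]==ar4[i][1]):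
--         if (ar3[i+1][0]-ar3[i][0])<(ar4[i+1][0]-ar4[i][0]):
--             return ar3[i+1][0]+ar4[i][0]
--         else :
--             return ar3[i][0]+ar4[i+1][0]
--     return ar3[0][0]+ar4[0][0]
-- ===== SOURCE B (Python) =====
-- def twinArrays(ar1, ar2):
--     def two_min(ar):
--         m1, i1, m2 = ar[0], 0, ar[1]
--         if m2 < m1:
--             m1, i1, m2 = m2, 1, m1
--         for i in range(2, len(ar)):
--             x = ar[i]
--             if x < m1:
--                 m1, i1, m2 = x, i, m1
--             elif x < m2:
--                 m2 = x
--         return m1, i1, m2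
--     a1, j1, s1 = two_min(ar1)
--     a2, j2, s2 = two_min(ar2)
--     if j1 != j2:
--         return a1 + a2
--     if s1 - a1 < s2 - a2:
--         return s1 + a2
--     return a1 + s2
-- ===== Notes on version B (the rewrite author's own statement) =====
-- stated objective: faster
-- what changed: Replaces building two index-tagged pair lists and stably sorting both with a single linear pass per array that tracks the smallest element (with its first index) and the second-smallest element.
-- outside the precondition, e.g. on twinArrays([5, 6], [1, 2, 3]): A returns 6, B returns 7
import Mathlib
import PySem

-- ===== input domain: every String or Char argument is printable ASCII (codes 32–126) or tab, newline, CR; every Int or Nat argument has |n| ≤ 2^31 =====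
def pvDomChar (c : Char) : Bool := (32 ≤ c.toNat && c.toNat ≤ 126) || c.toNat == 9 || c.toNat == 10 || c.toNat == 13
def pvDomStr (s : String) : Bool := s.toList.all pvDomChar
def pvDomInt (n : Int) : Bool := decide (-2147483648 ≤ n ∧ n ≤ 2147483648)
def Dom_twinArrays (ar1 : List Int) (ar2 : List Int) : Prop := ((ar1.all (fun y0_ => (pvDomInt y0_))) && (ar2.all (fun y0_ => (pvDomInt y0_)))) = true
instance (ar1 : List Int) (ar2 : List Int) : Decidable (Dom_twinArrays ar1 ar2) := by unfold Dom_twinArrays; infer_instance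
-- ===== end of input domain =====

-- B replaces A's build-pairs-and-stable-sort with one linear pass per array tracking the
-- two smallest values (and the first index of the minimum); objective: faster (asymptotic).

-- ===== PORT A =====
-- A builds ar3/ar4 as zero pair lists, fills them with (value, index), stably sorts both
-- by the value component, then reads the first two entries of each.

def twinArrays (ar1 : List Int) (ar2 : List Int) : Int :=
  let ar3_0 : List (Int × Int) := List.replicate ar1.length ((0 : Int), (0 : Int))
  let ar4_0 : List (Int × Int) := List.replicate ar2.length ((0 : Int), (0 : Int))
  let p := (PySem.List.pyRange 0 (PySem.List.len ar1)).foldl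
    (fun (p : List (Int × Int) × List (Int × Int)) i =>
      (PySem.List.pySetD p.1 i (PySem.List.pyGetD ar1 i 0, i),
       PySem.List.pySetD p.2 i (PySem.List.pyGetD ar2 i 0, i))) (ar3_0, ar4_0)
  let ar3 := PySem.List.sorted p.1 (fun x => x.1)
  let ar4 := PySem.List.sorted p.2 (fun x => x.1)
  if (PySem.List.pyGetD ar3 0 (0, 0)).2 = (PySem.List.pyGetD ar4 0 (0, 0)).2 then
    if (PySem.List.pyGetD ar3 1 (0, 0)).1 - (PySem.List.pyGetD ar3 0 (0, 0)).1 <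
       (PySem.List.pyGetD ar4 1 (0, 0)).1 - (PySem.List.pyGetD ar4 0 (0, 0)).1 then
      (PySem.List.pyGetD ar3 1 (0, 0)).1 + (PySem.List.pyGetD ar4 0 (0, 0)).1
    else
      (PySem.List.pyGetD ar3 0 (0, 0)).1 + (PySem.List.pyGetD ar4 1 (0, 0)).1
  else (PySem.List.pyGetD ar3 0 (0, 0)).1 + (PySem.List.pyGetD ar4 0 (0, 0)).1

-- ===== PORT B =====
-- two_min: one pass, state (m1, i1, m2) = smallest value, its first index, second-smallest value

def twoMinStep (ar : List Int) (s : Int × Int × Int) (i : Int) : Int × Int × Int :=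
  let x := PySem.List.pyGetD ar i 0
  if x < s.1 then (x, i, s.1)
  else if x < s.2.2 then (s.1, s.2.1, x)
  else s

def twoMin (ar : List Int) : Int × Int × Int :=
  let m1 := PySem.List.pyGetD ar 0 0
  let m2 := PySem.List.pyGetD ar 1 0
  let s0 : Int × Int × Int := if m2 < m1 then (m2, 1, m1) else (m1, 0, m2)
  (PySem.List.pyRange 2 (PySem.List.len ar)).foldl (twoMinStep ar) s0

def twinArrays_alt (ar1 : List Int) (ar2 : List Int) : Int :=
  let t1 := twoMin ar1
  let t2 := twoMin ar2
  if t1.2.1 ≠ t2.2.1 then t1.1 + t2.1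
  else if t1.2.2 - t1.1 < t2.2.2 - t2.1 then t1.2.2 + t2.1
  else t1.1 + t2.2.2

-- ===== PRECONDITION & SPEC =====
-- Pre_ restricts to the natural twin-array domain: equal lengths ≥ 2.  A raises IndexError
-- whenever len ar1 > len ar2 or the (equal) length is < 2; when len ar1 < len ar2 A returns,
-- but its value is corrupted by the unfilled (0,0) padding entries of ar4 — an artefact of
-- A's pre-allocation, excluded as outside the natural domain (see claim cites).
def Pre_twinArrays (ar1 : List Int) (ar2 : List Int) : Prop :=
  ar1.length = ar2.length ∧ 2 ≤ ar1.length
instance (ar1 : List Int) (ar2 : List Int) : Decidable (Pre_twinArrays ar1 ar2) := by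
  unfold Pre_twinArrays; infer_instance

def pvWitness_twinArrays : List Int × List Int := ([1, 2], [3, 4])

def Spec_twinArrays (ar1 : List Int) (ar2 : List Int) (out : Int) : Prop := out = twinArrays_alt ar1 ar2
instance (ar1 : List Int) (ar2 : List Int) (out : Int) : Decidable (Spec_twinArrays ar1 ar2 out) := by unfold Spec_twinArrays; infer_instance

-- ===== CLAIM (what is proved, stated in full; the proofs are below) =====
def Claim_equal_twinArrays : Prop := ∀ (ar1 : List Int) (ar2 : List Int), Dom_twinArrays ar1 ar2 → Pre_twinArrays ar1 ar2 → Spec_twinArrays ar1 ar2 (twinArrays ar1 ar2)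

-- ===== LEMMAS AND PROOFS =====

def pairsFrom (k : Int) : List Int → List (Int × Int)
  | [] => []
  | x :: xs => (x, k) :: pairsFrom (k + 1) xs

theorem pairsFrom_length (k : Int) (xs : List Int) : (pairsFrom k xs).length = xs.length := by
  induction xs generalizing k with
  | nil => rfl
  | cons x xs ih => simp [pairsFrom, ih]

theorem pairsFrom_append (k : Int) (l1 l2 : List Int) :
    pairsFrom k (l1 ++ l2) = pairsFrom k l1 ++ pairsFrom (k + l1.length) l2 := by
  induction l1 generalizing k with
  | nil => simp [pairsFrom]
  | cons x xs ih => simp [pairsFrom, ih]; ring_nf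

theorem fill_one (xs : List Int) (n k : Nat) (hn : xs.length = n) (hk : k ≤ n) :
    (PySem.List.pyRange 0 (k : Int)).foldl
      (fun acc i => PySem.List.pySetD acc i (PySem.List.pyGetD xs i 0, i))
      (List.replicate n ((0 : Int), (0 : Int)))
    = pairsFrom 0 (xs.take k) ++ List.replicate (n - k) ((0 : Int), (0 : Int)) := by
  induction k with
  | zero => simp [PySem.List.pyRange_one_eq_nil, pairsFrom]
  | succ k ih =>
    have hk' : k ≤ n := Nat.le_of_succ_le hk
    have hrange : PySem.List.pyRange 0 ((k + 1 : Nat) : Int) = PySem.List.pyRange 0 (k : Int) ++ [(k : Int)] := by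
      push_cast
      exact PySem.List.pyRange_one_succ_right (by positivity)
    rw [hrange, List.foldl_append, ih hk']
    simp only [List.foldl_cons, List.foldl_nil]
    have hkl : k < xs.length := by omega
    rw [PySem.List.pySetD_natCast]
    rw [List.set_append]
    have hplen : (pairsFrom 0 (xs.take k)).length = k := by
      rw [pairsFrom_length]; simp [hk', hn]
    rw [hplen]
    simp only [lt_irrefl, if_false, Nat.sub_self]
    have hrep : List.replicate (n - k) ((0 : Int), (0 : Int))
        = ((0 : Int), (0 : Int)) :: List.replicate (n - k - 1) ((0 : Int), (0 : Int)) := by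
      rw [← List.replicate_succ]; congr 1; omega
    rw [hrep]
    simp only [List.set_cons_zero]
    have htake : xs.take (k + 1) = xs.take k ++ [xs[k]] := by
      rw [List.take_add_one]
      simp [List.getElem?_eq_getElem hkl]
    rw [htake, pairsFrom_append]
    have hg : PySem.List.pyGetD xs (k : Int) 0 = xs[k] := by
      rw [PySem.List.pyGetD_natCast]
      exact List.getD_eq_getElem xs 0 hkl
    simp [pairsFrom, hg, List.length_take, Nat.min_eq_left (by omega : k ≤ xs.length), Nat.sub_sub]

theorem foldl_pyRange_pairs_aux {β : Type} (xs : List Int) (g : β → Int × Int → β) :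
    ∀ (n a : Nat) (init : β), a + n = xs.length →
    (PySem.List.pyRange (a : Int) (PySem.List.len xs)).foldl
      (fun s i => g s (PySem.List.pyGetD xs i 0, i)) init
    = (pairsFrom (a : Int) (xs.drop a)).foldl g init := by
  intro n
  induction n with
  | zero =>
    intro a init ha
    rw [PySem.List.pyRange_one_eq_nil (by simp [PySem.List.len]; omega)]
    rw [List.drop_of_length_le (by omega)]
    simp [pairsFrom]
  | succ n ih =>
    intro a init ha
    have hal : a < xs.length := by omega
    rw [PySem.List.pyRange_one_cons (by simp [PySem.List.len]; omega)]
    rw [List.drop_eq_getElem_cons hal]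
    simp only [pairsFrom, List.foldl_cons]
    have hg : PySem.List.pyGetD xs (a : Int) 0 = xs[a] := by
      rw [PySem.List.pyGetD_natCast]
      exact List.getD_eq_getElem xs 0 hal
    rw [hg]
    have : ((a : Int) + 1) = ((a + 1 : Nat) : Int) := by push_cast; ring
    rw [this]
    exact ih (a + 1) (g init (xs[a], (a : Int))) (by omega)

theorem ins_take2 (l : List (Int × Int)) (acc : List (Int × Int))
    (m1 i1 m2 j : Int) (h : acc.take 2 = [(m1, i1), (m2, j)]) :
    ∃ j', (l.foldl (fun acc x =>
        PySem.List.insertBy (fun a b => decide (a.1 < b.1)) x acc) acc).take 2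
      = [((l.foldl (fun s p => if p.1 < s.1 then (p.1, p.2, s.1)
            else if p.1 < s.2.2 then (s.1, s.2.1, p.1) else s) (m1, i1, m2)).1,
          (l.foldl (fun s p => if p.1 < s.1 then (p.1, p.2, s.1)
            else if p.1 < s.2.2 then (s.1, s.2.1, p.1) else s) (m1, i1, m2)).2.1),
         ((l.foldl (fun s p => if p.1 < s.1 then (p.1, p.2, s.1)
            else if p.1 < s.2.2 then (s.1, s.2.1, p.1) else s) (m1, i1, m2)).2.2, j')] := by
  induction l generalizing acc m1 i1 m2 j with
  | nil => exact ⟨j, by simpa using h⟩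
  | cons p t ih =>
    obtain ⟨v, i⟩ := p
    match acc, h with
    | (a1 :: a2 :: rest), h =>
      simp at h
      obtain ⟨h1, h2⟩ := h
      subst h1 h2
      by_cases hv1 : v < m1
      · have := ih ((v, i) :: (m1, i1) :: (m2, j) :: rest) v i m1 i1 (by simp)
        simpa [List.foldl_cons, PySem.List.insertBy, hv1] using this
      · by_cases hv2 : v < m2
        · have := ih ((m1, i1) :: (v, i) :: (m2, j) :: rest) m1 i1 v i (by simp)
          simpa [List.foldl_cons, PySem.List.insertBy, hv1, hv2, not_lt.mp hv1] using this
        · have := ih ((m1, i1) :: PySem.List.insertBy (fun a b => decide (a.1 < b.1)) (v, i) ((m2, j) :: rest)) m1 i1 m2 j (by simp [PySem.List.insertBy, hv2])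
          simpa [List.foldl_cons, PySem.List.insertBy, hv1, hv2] using this

theorem twoMin_eq_foldl_pairs (x0 x1 : Int) (rest : List Int) :
    twoMin (x0 :: x1 :: rest)
    = (pairsFrom 2 rest).foldl
        (fun s p => if p.1 < s.1 then (p.1, p.2, s.1)
          else if p.1 < s.2.2 then (s.1, s.2.1, p.1) else s)
        (if x1 < x0 then (x1, 1, x0) else (x0, 0, x1)) := by
  have h0 : PySem.List.pyGetD (x0 :: x1 :: rest) 0 0 = x0 := by
    simp [PySem.List.pyGetD_zero_cons]
  have h1 : PySem.List.pyGetD (x0 :: x1 :: rest) (1 : Int) 0 = x1 := by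
    have := PySem.List.pyGetD_natCast (x0 :: x1 :: rest) 1 0
    simpa using this
  unfold twoMin
  rw [h0, h1]
  have := foldl_pyRange_pairs_aux (x0 :: x1 :: rest)
    (fun s p => if p.1 < s.1 then (p.1, p.2, s.1)
      else if p.1 < s.2.2 then (s.1, s.2.1, p.1) else s)
    rest.length 2 (if x1 < x0 then (x1, 1, x0) else (x0, 0, x1)) (by simp; omega)
  simpa [twoMinStep] using this

theorem sorted_take2 (xs : List Int) (h : 2 ≤ xs.length) :
    ∃ j', (PySem.List.sorted (pairsFrom 0 xs) (fun x => x.1)).take 2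
      = [((twoMin xs).1, (twoMin xs).2.1), ((twoMin xs).2.2, j')] := by
  match xs, h with
  | (x0 :: x1 :: rest), _ =>
    rw [PySem.List.sorted_eq_foldl_insertBy]
    have hpf : pairsFrom 0 (x0 :: x1 :: rest) = (x0, 0) :: (x1, 1) :: pairsFrom 2 rest := by
      norm_num [pairsFrom]
    rw [hpf]
    simp only [List.foldl_cons]
    rw [twoMin_eq_foldl_pairs]
    by_cases hx : x1 < x0
    · simp only [PySem.List.insertBy, if_pos hx]
      simp only [show decide ((x1, (1:Int)).1 < (x0, (0:Int)).1) = true by simpa using hx, if_true]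
      exact ins_take2 (pairsFrom 2 rest) [(x1, 1), (x0, 0)] x1 1 x0 0 (by simp)
    · simp only [PySem.List.insertBy, if_neg hx]
      simp only [show decide ((x1, (1:Int)).1 < (x0, (0:Int)).1) = false by simpa using hx]
      exact ins_take2 (pairsFrom 2 rest) [(x0, 0), (x1, 1)] x0 0 x1 1 (by simp)

theorem take2_cases {α : Type} (l : List α) (a b : α) (h : l.take 2 = [a, b]) :
    ∃ t, l = a :: b :: t := by
  match l, h with
  | (x :: y :: t), h =>
    simp at h
    exact ⟨t, by simp [h.1, h.2]⟩

theorem fill_pair (ar1 ar2 : List Int) (hlen : ar1.length = ar2.length) :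
    (PySem.List.pyRange 0 (PySem.List.len ar1)).foldl
      (fun (p : List (Int × Int) × List (Int × Int)) i =>
        (PySem.List.pySetD p.1 i (PySem.List.pyGetD ar1 i 0, i),
         PySem.List.pySetD p.2 i (PySem.List.pyGetD ar2 i 0, i)))
      (List.replicate ar1.length ((0 : Int), (0 : Int)),
       List.replicate ar2.length ((0 : Int), (0 : Int)))
    = (pairsFrom 0 ar1, pairsFrom 0 ar2) := by
  rw [PySem.List.foldl_prod_mk
    (fun acc i => PySem.List.pySetD acc i (PySem.List.pyGetD ar1 i 0, i))
    (fun acc i => PySem.List.pySetD acc i (PySem.List.pyGetD ar2 i 0, i))]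
  have hr : PySem.List.pyRange 0 (PySem.List.len ar1) = PySem.List.pyRange 0 ((ar1.length : Nat) : Int) := by
    simp [PySem.List.len_eq]
  rw [hr, fill_one ar1 ar1.length ar1.length rfl le_rfl,
      fill_one ar2 ar2.length ar1.length rfl (le_of_eq hlen)]
  have t1 : List.take ar1.length ar1 = ar1 := List.take_length
  have t2 : List.take ar1.length ar2 = ar2 := by rw [hlen]; exact List.take_length
  have z2 : ar2.length - ar1.length = 0 := by omega
  rw [t1, t2, z2]
  simp

theorem main_eq (ar1 ar2 : List Int) (hlen : ar1.length = ar2.length) (h2 : 2 ≤ ar1.length) :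
    twinArrays ar1 ar2 = twinArrays_alt ar1 ar2 := by
  unfold twinArrays twinArrays_alt
  simp only []
  rw [fill_pair ar1 ar2 hlen]
  obtain ⟨j1', e1⟩ := sorted_take2 ar1 h2
  obtain ⟨j2', e2⟩ := sorted_take2 ar2 (by omega)
  obtain ⟨t1, ht1⟩ := take2_cases _ _ _ e1
  obtain ⟨t2, ht2⟩ := take2_cases _ _ _ e2
  rw [ht1, ht2]
  have g0 : ∀ (a b : Int × Int) (t : List (Int × Int)), PySem.List.pyGetD (a :: b :: t) 0 ((0:Int),(0:Int)) = a := by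
    intro a b t; simp [PySem.List.pyGetD_zero_cons]
  have g1 : ∀ (a b : Int × Int) (t : List (Int × Int)), PySem.List.pyGetD (a :: b :: t) (1 : Int) ((0:Int),(0:Int)) = b := by
    intro a b t
    have := PySem.List.pyGetD_natCast (a :: b :: t) 1 ((0:Int),(0:Int))
    simpa using this
  rw [g0, g0, g1, g1]
  by_cases heq : (twoMin ar1).2.1 = (twoMin ar2).2.1 <;> simp [heq]

-- ===== VERDICT (by name: the statement is the Claim_ definition above) =====
theorem twinArrays_spec : Claim_equal_twinArrays := by
  intro ar1 ar2 _ hpre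
  unfold Spec_twinArrays
  exact main_eq ar1 ar2 hpre.1 hpre.2
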